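-- pv_equiv track=rewrite | github.com/SiliveriSriharshini/Image-Compression | Image_comp/lz77/lz77_ende.py | decode_lz77
-- ===== SOURCE A (Python) =====
-- def decode_lz77(encodedNums, encodedLengths, encodedLetters):
--     i = 0
--     decodedString = []
--
--     while i < len(encodedNums):
--         if (i == 1 and encodedLetters[i] == encodedLetters[0]):
--             decodedString.append(encodedLetters[i])
--             i = i+1
--         else:
--             if (encodedNums[i] == 0):
--                 decodedString.append(encodedLetters[i])
--             else:
--                 currentSize = len(decodedString)
--                 for j in range(0, encodedLengths[i]):
--                     decodedString.append(
--                         decodedString[currentSize-encodedNums[i]+j])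
--                 decodedString.append(encodedLetters[i])
--             i = i+1
--     return decodedString
-- ===== SOURCE B (Python) =====
-- def decode_lz77(encodedNums, encodedLengths, encodedLetters):
--     triples = list(zip(encodedNums, encodedLengths, encodedLetters))
--     if len(triples) >= 2 and triples[1][2] == triples[0][2]:
--         triples[1] = (0, 0, triples[1][2])
--     decoded = []
--     for num, length, ch in triples:
--         if num != 0:
--             seg = decoded[len(decoded) - num:]
--             decoded.extend((seg * (length // num + 1))[:length])
--         decoded.append(ch)
--     return decoded
-- ===== Notes on version B (the rewrite author's own statement) =====
-- stated objective: alternative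
-- what changed: B first zips the three input lists into one triple list and normalizes the i==1 special case into an ordinary literal triple, then folds a uniform step over the triples; the self-referential character-by-character copy becomes a block paste of the last num symbols via list repetition plus truncation.
-- outside the precondition, e.g. on decode_lz77([0, 2], [0, 3], ['a', 'b']): A returns ['a', 'a', 'a', 'a', 'b'], B returns ['a', 'a', 'a', 'b']
import Mathlib
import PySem

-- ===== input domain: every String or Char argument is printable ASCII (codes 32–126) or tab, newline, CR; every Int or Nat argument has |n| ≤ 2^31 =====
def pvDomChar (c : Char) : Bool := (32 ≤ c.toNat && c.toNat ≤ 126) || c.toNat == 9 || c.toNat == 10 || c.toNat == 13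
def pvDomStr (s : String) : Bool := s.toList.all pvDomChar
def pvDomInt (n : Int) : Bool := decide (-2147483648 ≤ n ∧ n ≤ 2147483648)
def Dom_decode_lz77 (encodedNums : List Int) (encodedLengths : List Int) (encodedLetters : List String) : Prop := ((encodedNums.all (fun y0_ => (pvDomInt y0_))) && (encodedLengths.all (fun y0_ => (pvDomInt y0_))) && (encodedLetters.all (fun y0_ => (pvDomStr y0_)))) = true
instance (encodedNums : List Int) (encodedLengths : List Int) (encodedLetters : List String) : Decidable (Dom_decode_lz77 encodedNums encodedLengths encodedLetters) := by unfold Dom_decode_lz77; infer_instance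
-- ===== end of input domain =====

-- B zips the three lists into one triple list, normalizes A's i==1 special case into
-- an ordinary literal triple, then folds a uniform step over the triples; the
-- self-referential per-character copy becomes a block paste (slice, repeat, truncate).

-- ===== PORT A =====
-- inner `for j in range(0, encodedLengths[i])` copy loop of A
def pvAInner (decoded : List String) (num : Int) (L : Int) : List String :=
  let cs : Int := decoded.length
  (PySem.List.pyRange 0 L 1).foldl
    (fun acc j => acc ++ [PySem.List.pyGetD acc (cs - num + j) ""]) decoded

-- the `while i < len(encodedNums)` loop of A
def pvALoop (nums : List Int) (lengths : List Int) (letters : List String) :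
    Nat → List String → List String
  | i, decoded =>
    if _h : i < nums.length then
      if i = 1 ∧ PySem.List.pyGetD letters 1 "" = PySem.List.pyGetD letters 0 "" then
        pvALoop nums lengths letters (i+1) (decoded ++ [PySem.List.pyGetD letters 1 ""])
      else if PySem.List.pyGetD nums (i : Int) 0 = 0 then
        pvALoop nums lengths letters (i+1) (decoded ++ [PySem.List.pyGetD letters (i : Int) ""])
      else
        pvALoop nums lengths letters (i+1)
          (pvAInner decoded (PySem.List.pyGetD nums (i : Int) 0) (PySem.List.pyGetD lengths (i : Int) 0)
            ++ [PySem.List.pyGetD letters (i : Int) ""])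
    else decoded
  termination_by i _ => nums.length - i

def decode_lz77 (encodedNums : List Int) (encodedLengths : List Int) (encodedLetters : List String) : List String :=
  pvALoop encodedNums encodedLengths encodedLetters 0 []

-- ===== PORT B =====
-- B's normalization: `if len(triples) >= 2 and triples[1][2] == triples[0][2]: triples[1] = (0, 0, triples[1][2])`
def pvNormalize (ts : List (Int × Int × String)) : List (Int × Int × String) :=
  match ts with
  | t0 :: t1 :: rest => if t1.2.2 = t0.2.2 then t0 :: (0, 0, t1.2.2) :: rest else t0 :: t1 :: rest
  | other => other

-- B's back-reference block: seg = decoded[len(decoded)-num:]; (seg * (length//num + 1))[:length]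
def pvBBlock (decoded : List String) (num : Int) (L : Int) : List String :=
  let seg := PySem.List.slice decoded (some ((decoded.length : Int) - num)) none
  PySem.List.slice (PySem.List.pyRepeat seg (PySem.Int.floordiv L num + 1)) none (some L)

-- B's uniform loop body over one triple (num, length, ch)
def pvBStep (decoded : List String) (t : Int × Int × String) : List String :=
  let d := if t.1 ≠ 0 then decoded ++ pvBBlock decoded t.1 t.2.1 else decoded
  d ++ [t.2.2]

def decode_lz77_alt (encodedNums : List Int) (encodedLengths : List Int) (encodedLetters : List String) : List String :=
  (pvNormalize (encodedNums.zip (encodedLengths.zip encodedLetters))).foldl pvBStep []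

-- ===== PRECONDITION & SPEC =====
-- closed-form decoded length before step i (the standard LZ77 length recurrence)
def pvStepSize (nums : List Int) (lengths : List Int) (letters : List String) (i : Nat) : Nat :=
  if (i = 1 ∧ letters.getD 1 "" = letters.getD 0 "") ∨ nums.getD i 0 = 0 then 1
  else (lengths.getD i 0).toNat + 1

-- decoded length before step i: a prefix sum of the per-step output sizes
def pvSize (nums : List Int) (lengths : List Int) (letters : List String) (i : Nat) : Nat :=
  ((List.range i).map (pvStepSize nums lengths letters)).sum

-- Pre_ excludes malformed inputs: index lists shorter than the triple count (A raises
-- IndexError) and malformed back-references whose offset is negative or exceeds the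
-- decoded length so far while a positive copy length is requested — there A either
-- raises IndexError or returns an accidental value of its negative-index wraparound.
def Pre_decode_lz77 (encodedNums : List Int) (encodedLengths : List Int) (encodedLetters : List String) : Prop :=
  encodedNums.length ≤ encodedLetters.length ∧
  encodedNums.length ≤ encodedLengths.length ∧
  ∀ i, i < encodedNums.length →
    ((i = 1 ∧ encodedLetters.getD 1 "" = encodedLetters.getD 0 "") ∨
     encodedNums.getD i 0 = 0 ∨
     encodedLengths.getD i 0 ≤ 0 ∨
     (0 < encodedNums.getD i 0 ∧ encodedNums.getD i 0 ≤ (pvSize encodedNums encodedLengths encodedLetters i : Int)))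

instance (encodedNums : List Int) (encodedLengths : List Int) (encodedLetters : List String) : Decidable (Pre_decode_lz77 encodedNums encodedLengths encodedLetters) := by unfold Pre_decode_lz77; infer_instance

def pvWitness_decode_lz77 : List Int × List Int × List String :=
  ([0, 1, 2], [0, 2, 3], ["a", "b", "c"])

def Spec_decode_lz77 (encodedNums : List Int) (encodedLengths : List Int) (encodedLetters : List String) (out : List String) : Prop := out = decode_lz77_alt encodedNums encodedLengths encodedLetters
instance (encodedNums : List Int) (encodedLengths : List Int) (encodedLetters : List String) (out : List String) : Decidable (Spec_decode_lz77 encodedNums encodedLengths encodedLetters out) := by unfold Spec_decode_lz77; infer_instance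

-- ===== CLAIM (what is proved, stated in full; the proofs are below) =====
def Claim_equal_decode_lz77 : Prop := ∀ (encodedNums : List Int) (encodedLengths : List Int) (encodedLetters : List String), Dom_decode_lz77 encodedNums encodedLengths encodedLetters → Pre_decode_lz77 encodedNums encodedLengths encodedLetters → Spec_decode_lz77 encodedNums encodedLengths encodedLetters (decode_lz77 encodedNums encodedLengths encodedLetters)

-- ===== LEMMAS AND PROOFS =====

theorem pvSize_succ (nums lengths : List Int) (letters : List String) (i : Nat) :
    pvSize nums lengths letters (i+1) =
      pvSize nums lengths letters i + pvStepSize nums lengths letters i := by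
  simp [pvSize, List.range_succ]

-- closed form of A's inner copy loop: it appends the periodic continuation of
-- the last `num` decoded symbols
theorem pvAInner_aux (decoded : List String) (num : Int)
    (h1 : 0 < num) (h2 : num ≤ (decoded.length : Int)) :
    ∀ m : Nat, (List.range m).foldl
        (fun (acc : List String) (j : Nat) => acc ++ [PySem.List.pyGetD acc ((decoded.length : Int) - num + (j : Int)) ""]) decoded
      = decoded ++ (List.range m).map
          (fun j => (decoded.drop (decoded.length - num.toNat)).getD (j % num.toNat) "") := by
  intro m
  set n := num.toNat with hn
  have hnum : num = (n : Int) := by omega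
  have hnpos : 0 < n := by omega
  have hnle : n ≤ decoded.length := by omega
  induction m with
  | zero => simp
  | succ m ih =>
    rw [List.range_succ, List.foldl_append, List.map_append, ih]
    simp only [List.foldl_cons, List.foldl_nil, List.map_cons, List.map_nil, List.append_assoc]
    congr 2
    set acc := decoded ++ (List.range m).map
          (fun j => (decoded.drop (decoded.length - n)).getD (j % n) "") with hacc
    have hlen : acc.length = decoded.length + m := by simp [hacc]
    have hidx : (0:Int) ≤ (decoded.length : Int) - num + m := by omega
    have hidx2 : (decoded.length : Int) - num + m < (acc.length : Int) := by
      rw [hlen]; push_cast; omega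
    rw [PySem.List.pyGetD_eq_getElem acc "" hidx hidx2]
    have htn : ((decoded.length : Int) - num + m).toNat = decoded.length - n + m := by omega
    have hseg : (decoded.drop (decoded.length - n)).length = n := by
      simp [List.length_drop]; omega
    by_cases hm : m < n
    · rw [List.getElem_append_left (by omega)]
      simp only [htn]
      have hg : decoded[decoded.length - n + m]'(by omega) =
          (decoded.drop (decoded.length - n))[m]'(by omega) := by
        rw [List.getElem_drop]
      rw [hg, Nat.mod_eq_of_lt hm, List.getD_eq_getElem _ _ (by omega)]
    · rw [List.getElem_append_right (by omega)]
      simp only [htn]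
      have hi2 : decoded.length - n + m - decoded.length = m - n := by omega
      simp only [hi2]
      rw [List.getElem_map]
      rw [List.getElem_range]
      have : (m - n) % n = m % n := (Nat.mod_eq_sub_mod (by omega)).symm
      rw [this]

theorem pvAInner_closed (decoded : List String) (num L : Int)
    (h1 : 0 < num) (h2 : num ≤ (decoded.length : Int)) :
    pvAInner decoded num L =
      decoded ++ (List.range L.toNat).map
        (fun j => (decoded.drop (decoded.length - num.toNat)).getD (j % num.toNat) "") := by
  unfold pvAInner
  rw [PySem.List.pyRange_one, List.foldl_map]
  simp only [zero_add, Int.sub_zero]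
  exact pvAInner_aux decoded num h1 h2 L.toNat

theorem pvAInner_nonpos (decoded : List String) (num L : Int) (hL : L ≤ 0) :
    pvAInner decoded num L = decoded := by
  unfold pvAInner
  rw [PySem.List.pyRange_one_eq_nil (by omega)]
  rfl

theorem pvSegMap (seg : List String) :
    (List.range seg.length).map (fun j => seg.getD j "") = seg := by
  apply List.ext_getElem
  · simp
  · intro i h1 h2
    simp [List.getElem?_eq_getElem h2]

theorem pvFlattenRep (seg : List String) (n : Nat) (hseg : seg.length = n) :
    ∀ k : Nat, (List.replicate k seg).flatten =
      (List.range (k * n)).map (fun j => seg.getD (j % n) "") := by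
  intro k
  induction k with
  | zero => simp
  | succ k ih =>
    rw [List.replicate_succ, List.flatten_cons, ih]
    have hrw : (k+1) * n = n + k * n := by ring
    rw [hrw, List.range_add, List.map_append, List.map_map]
    congr 1
    · conv_lhs => rw [← pvSegMap seg]
      rw [hseg]
      apply List.map_congr_left
      intro j hj
      simp at hj
      rw [Nat.mod_eq_of_lt hj]
    · apply List.map_congr_left
      intro j hj
      simp [Nat.add_mod_left]

-- closed form of B's block
theorem pvBBlock_closed (decoded : List String) (num L : Int)
    (h1 : 0 < num) (h2 : num ≤ (decoded.length : Int)) (hL : 0 ≤ L) :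
    pvBBlock decoded num L =
      (List.range L.toNat).map
        (fun j => (decoded.drop (decoded.length - num.toNat)).getD (j % num.toNat) "") := by
  unfold pvBBlock
  set n := num.toNat with hn
  set m := L.toNat with hm
  have hnum : num = (n : Int) := by omega
  have hLm : L = (m : Int) := by omega
  have hnpos : 0 < n := by omega
  have hnle : n ≤ decoded.length := by omega
  have hseg : PySem.List.slice decoded (some ((decoded.length : Int) - num)) none
      = decoded.drop (decoded.length - n) := by
    rw [PySem.List.slice_from decoded (by omega)]
    congr 1
    omega
  rw [hseg]
  set seg := decoded.drop (decoded.length - n) with hsegdef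
  have hsl : seg.length = n := by simp [hsegdef]; omega
  have hdivrw : PySem.Int.floordiv L num + 1 = ((m / n + 1 : Nat) : Int) := by
    rw [hLm, hnum, PySem.Int.floordiv_natCast]
    push_cast; ring
  rw [hdivrw]
  unfold PySem.List.pyRepeat
  rw [Int.toNat_natCast]
  simp only []
  rw [pvFlattenRep seg n hsl (m / n + 1)]
  rw [PySem.List.slice_to _ hL, ← hm, ← List.map_take, List.take_range]
  have hmn : m ≤ (m / n + 1) * n := by
    have h5 : (m / n + 1) * n = n * (m / n) + n := by ring
    rw [h5]
    have h3 := Nat.div_add_mod m n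
    have h4 : m % n < n := Nat.mod_lt _ (by omega)
    omega
  rw [Nat.min_eq_left hmn]

theorem pvSliceNil (a b : Option Int) : PySem.List.slice ([] : List String) a b = [] := by
  simp [PySem.List.slice]

-- degenerate copy: nonpositive length appends nothing on both sides
theorem pvBBlock_nonpos (decoded : List String) (num L : Int)
    (hnum : num ≠ 0) (hL : L ≤ 0) : pvBBlock decoded num L = [] := by
  unfold pvBBlock
  simp only []
  rcases lt_or_eq_of_le hL with hlt | heq
  · rcases lt_or_gt_of_ne hnum with hneg | hpos
    · have hseg : PySem.List.slice decoded (some ((decoded.length : Int) - num)) none = [] := by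
        rw [PySem.List.slice_from decoded (by omega)]
        apply List.drop_eq_nil_of_le
        omega
      rw [hseg]
      simp [PySem.List.pyRepeat, pvSliceNil]
    · have hq : PySem.Int.floordiv L num < 0 := by
        rw [PySem.Int.floordiv_lt_iff_lt_mul hpos]
        omega
      have h0 : (PySem.Int.floordiv L num + 1).toNat = 0 := by omega
      simp [PySem.List.pyRepeat, h0, pvSliceNil]
  · subst heq
    rw [PySem.List.slice_to _ (by omega)]
    simp

-- one back-reference step of A equals one of B
theorem pvStep_eq (decoded : List String) (num L : Int) (hnum : num ≠ 0)
    (hok : 0 < L → (0 < num ∧ num ≤ (decoded.length : Int))) :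
    pvAInner decoded num L = decoded ++ pvBBlock decoded num L := by
  by_cases hL : 0 < L
  · obtain ⟨ha, hb⟩ := hok hL
    rw [pvAInner_closed decoded num L ha hb, pvBBlock_closed decoded num L ha hb (by omega)]
  · rw [pvAInner_nonpos decoded num L (by omega), pvBBlock_nonpos decoded num L hnum (by omega)]
    simp

-- the length a back-reference step adds
theorem pvStep_len (decoded : List String) (num L : Int) (hnum : num ≠ 0)
    (hok : 0 < L → (0 < num ∧ num ≤ (decoded.length : Int))) :
    (decoded ++ pvBBlock decoded num L).length = decoded.length + L.toNat := by
  by_cases hL : 0 < L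
  · obtain ⟨ha, hb⟩ := hok hL
    rw [pvBBlock_closed decoded num L ha hb (by omega)]
    simp
  · rw [pvBBlock_nonpos decoded num L hnum (by omega)]
    simp
    omega

-- the triple B's normalized list carries at position i
def pvExpected (nums lengths : List Int) (letters : List String) (i : Nat) : Int × Int × String :=
  if i = 1 ∧ letters.getD 1 "" = letters.getD 0 "" then (0, 0, letters.getD 1 "")
  else (nums.getD i 0, lengths.getD i 0, letters.getD i "")

theorem pvZip3_getElem? (nums lengths : List Int) (letters : List String)
    (h1 : nums.length ≤ lengths.length) (h2 : nums.length ≤ letters.length)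
    (i : Nat) (hi : i < nums.length) :
    (nums.zip (lengths.zip letters))[i]? =
      some (nums.getD i 0, lengths.getD i 0, letters.getD i "") := by
  have hz : i < (nums.zip (lengths.zip letters)).length := by
    simp [List.length_zip]; omega
  rw [List.getElem?_eq_getElem hz, List.getElem_zip, List.getElem_zip]
  rw [List.getD_eq_getElem _ _ (by omega), List.getD_eq_getElem _ _ (by omega),
    List.getD_eq_getElem _ _ (by omega)]

theorem pvBStep_zero (decoded : List String) (t : Int × Int × String) (h : t.1 = 0) :
    pvBStep decoded t = decoded ++ [t.2.2] := by
  unfold pvBStep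
  rw [if_neg (by simp [h])]

theorem pvBStep_ne (decoded : List String) (t : Int × Int × String) (h : t.1 ≠ 0) :
    pvBStep decoded t = decoded ++ pvBBlock decoded t.1 t.2.1 ++ [t.2.2] := by
  unfold pvBStep
  rw [if_pos h]

theorem pvNorm_length (ts : List (Int × Int × String)) :
    (pvNormalize ts).length = ts.length := by
  match ts with
  | [] => rfl
  | [t] => rfl
  | t0 :: t1 :: rest =>
    simp only [pvNormalize]
    split_ifs <;> simp

theorem pvNorm_getElem?_ne_one (ts : List (Int × Int × String)) (i : Nat) (hi : i ≠ 1) :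
    (pvNormalize ts)[i]? = ts[i]? := by
  match ts with
  | [] => rfl
  | [t] => rfl
  | t0 :: t1 :: rest =>
    simp only [pvNormalize]
    split_ifs with h
    · match i, hi with
      | 0, _ => rfl
      | (k+2), _ => rfl
    · rfl

theorem pvTs_getElem? (nums lengths : List Int) (letters : List String)
    (h1 : nums.length ≤ lengths.length) (h2 : nums.length ≤ letters.length)
    (i : Nat) (hi : i < nums.length) :
    (pvNormalize (nums.zip (lengths.zip letters)))[i]? =
      some (pvExpected nums lengths letters i) := by
  by_cases hi1 : i = 1
  · subst hi1
    have hn2 : 2 ≤ nums.length := by omega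
    have hz0 := pvZip3_getElem? nums lengths letters h1 h2 0 (by omega)
    have hz1 := pvZip3_getElem? nums lengths letters h1 h2 1 (by omega)
    obtain ⟨t0, t1, rest, hts⟩ : ∃ t0 t1 rest,
        nums.zip (lengths.zip letters) = t0 :: t1 :: rest := by
      have hlz : 2 ≤ (nums.zip (lengths.zip letters)).length := by
        simp [List.length_zip]; omega
      match h : nums.zip (lengths.zip letters) with
      | [] => rw [h] at hlz; simp at hlz
      | [t] => rw [h] at hlz; simp at hlz
      | t0 :: t1 :: rest => exact ⟨t0, t1, rest, rfl⟩
    rw [hts] at hz0 hz1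
    simp only [List.getElem?_cons_zero, List.getElem?_cons_succ, Option.some.injEq] at hz0 hz1
    subst hz0
    subst hz1
    rw [hts]
    simp only [pvNormalize]
    unfold pvExpected
    by_cases hsp : letters.getD 1 "" = letters.getD 0 ""
    · rw [if_pos (show ((nums.getD 1 0, lengths.getD 1 0, letters.getD 1 "") :
          Int × Int × String).2.2 = (nums.getD 0 0, lengths.getD 0 0, letters.getD 0 "").2.2
          from hsp), if_pos ⟨rfl, hsp⟩]
      simp
    · rw [if_neg (show ¬((nums.getD 1 0, lengths.getD 1 0, letters.getD 1 "") :
          Int × Int × String).2.2 = (nums.getD 0 0, lengths.getD 0 0, letters.getD 0 "").2.2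
          from hsp), if_neg (fun h => hsp h.2)]
      simp
  · rw [pvNorm_getElem?_ne_one _ _ hi1, pvZip3_getElem? nums lengths letters h1 h2 i hi]
    unfold pvExpected
    rw [if_neg (by tauto)]

theorem pvLoop_eq (nums lengths : List Int) (letters : List String)
    (hpre : Pre_decode_lz77 nums lengths letters) :
    ∀ fuel i decoded, nums.length ≤ i + fuel →
      decoded.length = pvSize nums lengths letters i →
      pvALoop nums lengths letters i decoded =
        ((pvNormalize (nums.zip (lengths.zip letters))).drop i).foldl pvBStep decoded := by
  obtain ⟨hlet, hlen, hcond⟩ := hpre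
  have htslen : (pvNormalize (nums.zip (lengths.zip letters))).length = nums.length := by
    rw [pvNorm_length]; simp [List.length_zip]; omega
  intro fuel
  induction fuel with
  | zero =>
    intro i decoded hf _
    rw [pvALoop, dif_neg (by omega), List.drop_eq_nil_of_le (by omega), List.foldl_nil]
  | succ fuel ih =>
    intro i decoded hf hinv
    by_cases hi : i < nums.length
    · have hdrop : (pvNormalize (nums.zip (lengths.zip letters))).drop i =
          pvExpected nums lengths letters i ::
            (pvNormalize (nums.zip (lengths.zip letters))).drop (i+1) := by
        rw [List.drop_eq_getElem_cons (by omega)]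
        have := pvTs_getElem? nums lengths letters hlen hlet i hi
        rw [List.getElem?_eq_getElem (by omega), Option.some.injEq] at this
        rw [this]
      rw [hdrop, List.foldl_cons, pvALoop, dif_pos hi]
      have e1 : PySem.List.pyGetD letters 1 "" = letters.getD 1 "" := by
        have := PySem.List.pyGetD_natCast letters 1 ""
        simpa using this
      have e0 : PySem.List.pyGetD letters 0 "" = letters.getD 0 "" := by
        have := PySem.List.pyGetD_natCast letters 0 ""
        simpa using this
      by_cases hsp : i = 1 ∧ letters.getD 1 "" = letters.getD 0 ""
      · rw [if_pos (by rw [e1, e0]; exact hsp)]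
        have hexp : pvExpected nums lengths letters i = (0, 0, letters.getD 1 "") := by
          unfold pvExpected; rw [if_pos hsp]
        rw [hexp]
        have hstep : pvBStep decoded (0, 0, letters.getD 1 "") =
            decoded ++ [letters.getD 1 ""] := pvBStep_zero _ _ rfl
        rw [hstep, ← e1]
        apply ih _ _ (by omega)
        rw [pvSize_succ]
        have : pvStepSize nums lengths letters i = 1 := by
          unfold pvStepSize; rw [if_pos (Or.inl hsp)]
        simp only [List.length_append, List.length_cons, List.length_nil, hinv]
        omega
      · rw [if_neg (by rw [e1, e0]; exact hsp)]
        have hexp : pvExpected nums lengths letters i =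
            (nums.getD i 0, lengths.getD i 0, letters.getD i "") := by
          unfold pvExpected; rw [if_neg hsp]
        rw [hexp]
        have hgd : PySem.List.pyGetD nums (i : Int) 0 = nums.getD i 0 := by simp
        have hLd : PySem.List.pyGetD lengths (i : Int) 0 = lengths.getD i 0 := by simp
        have hld : PySem.List.pyGetD letters (i : Int) "" = letters.getD i "" := by simp
        by_cases hz : nums.getD i 0 = 0
        · rw [if_pos (by rw [hgd]; exact hz)]
          have hstep : pvBStep decoded (nums.getD i 0, lengths.getD i 0, letters.getD i "") =
              decoded ++ [letters.getD i ""] := pvBStep_zero _ _ hz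
          rw [hstep, ← hld]
          apply ih _ _ (by omega)
          rw [pvSize_succ]
          have : pvStepSize nums lengths letters i = 1 := by
            unfold pvStepSize; rw [if_pos (Or.inr hz)]
          simp only [List.length_append, List.length_cons, List.length_nil, hinv]
          omega
        · rw [if_neg (by rw [hgd]; exact hz)]
          have hok : 0 < lengths.getD i 0 →
              (0 < nums.getD i 0 ∧ nums.getD i 0 ≤ (decoded.length : Int)) := by
            intro hLpos
            rcases hcond i hi with h | h | h | h
            · exact absurd h hsp
            · exact absurd h hz
            · omega
            · rw [hinv]; exact h
          have hstep : pvBStep decoded (nums.getD i 0, lengths.getD i 0, letters.getD i "") =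
              decoded ++ pvBBlock decoded (nums.getD i 0) (lengths.getD i 0) ++
                [letters.getD i ""] := pvBStep_ne _ _ hz
          rw [hstep]
          have hinner : pvAInner decoded (PySem.List.pyGetD nums (i : Int) 0)
              (PySem.List.pyGetD lengths (i : Int) 0) =
              decoded ++ pvBBlock decoded (nums.getD i 0) (lengths.getD i 0) := by
            rw [hgd, hLd]
            exact pvStep_eq decoded _ _ hz hok
          rw [← hinner, ← hld]
          apply ih _ _ (by omega)
          rw [pvSize_succ]
          have hbl := pvStep_len decoded _ _ hz hok
          rw [← hinner] at hbl
          have hstepsz : pvStepSize nums lengths letters i = (lengths.getD i 0).toNat + 1 := by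
            unfold pvStepSize
            rw [if_neg (by rintro (hc | hc); exact hsp hc; exact hz hc)]
          simp only [List.length_append, List.length_cons, List.length_nil]
          omega
    · rw [pvALoop, dif_neg hi, List.drop_eq_nil_of_le (by omega), List.foldl_nil]

-- ===== VERDICT (by name: the statement is the Claim_ definition above) =====
theorem decode_lz77_spec : Claim_equal_decode_lz77 := by
  intro nums lengths letters _ hpre
  unfold Spec_decode_lz77 decode_lz77 decode_lz77_alt
  rw [pvLoop_eq nums lengths letters hpre nums.length 0 [] (by omega) rfl]
  rfl
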